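-- pv_equiv track=rewrite | github.com/jimitchavdadev/College | Sem 5/Info Security/Vignere Cipher/vignere_cipher_revised.py | reverse_and_shift_key
-- ===== SOURCE A (Python) =====
-- def reverse_and_shift_key(key):
--     # Reverse the given key string
--     reversed_key = key[::-1]
--
--     # Calculate the length of the key
--     key_length = len(key)
--
--     # Create a new string where each character in the reversed key is shifted backward by the length of the key
--     shifted_key = ''.join(
--         # For each character in the reversed key
--         chr((ord(char) - ord('A') - key_length) % 26 + ord('A'))  # Shift it backward and wrap around if necessary
--         for char in reversed_key
--     )
--     return shifted_key
-- ===== SOURCE B (Python) =====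
-- def reverse_and_shift_key(key):
--     # One left-to-right pass building the result back-to-front by prepending,
--     # with the shift amount reduced mod 26 once up front.
--     s = len(key) % 26
--     out = ""
--     for ch in key:
--         out = chr((ord(ch) - ord('A') - s) % 26 + ord('A')) + out
--     return out
-- ===== Notes on version B (the rewrite author's own statement) =====
-- stated objective: alternative
-- what changed: B replaces A's reverse-slice-then-join-comprehension with a single forward pass that builds the output back-to-front via a string-prepend accumulator, reducing the shift mod 26 once instead of per character; it trades A's linear join for quadratic string prepending on large keys.
import Mathlib
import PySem

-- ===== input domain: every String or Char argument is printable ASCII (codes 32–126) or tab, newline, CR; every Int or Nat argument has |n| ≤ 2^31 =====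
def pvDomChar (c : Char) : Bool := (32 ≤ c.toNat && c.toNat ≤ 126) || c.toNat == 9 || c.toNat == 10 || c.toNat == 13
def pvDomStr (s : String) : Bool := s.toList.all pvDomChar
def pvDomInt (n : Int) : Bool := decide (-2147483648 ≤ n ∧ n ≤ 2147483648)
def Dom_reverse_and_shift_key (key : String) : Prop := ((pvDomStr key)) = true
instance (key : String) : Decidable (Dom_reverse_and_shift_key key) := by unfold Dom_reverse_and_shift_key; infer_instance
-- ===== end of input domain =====

-- B builds the output in ONE forward pass, back-to-front via a prepend accumulator
-- (no reverse slice, no join), with the shift reduced mod 26 once (alternative decomposition).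

-- ===== PORT A =====
-- chr((ord(char) - ord('A') - key_length) % 26 + ord('A'))
def pvShiftA (n : Nat) (c : Char) : Char :=
  Char.ofNat ((PySem.Int.mod ((c.toNat : Int) - 65 - (n : Int)) 26 + 65).toNat)

def reverse_and_shift_key (key : String) : String :=
  let reversedKey := key.toList.reverse      -- key[::-1]
  let keyLength := key.toList.length
  String.ofList (reversedKey.map (fun c => pvShiftA keyLength c))

-- ===== PORT B =====
-- s = len(key) % 26; for ch in key: out = chr((ord(ch)-65-s)%26+65) + out
def reverse_and_shift_key_alt (key : String) : String :=
  let s := PySem.Int.mod (key.toList.length : Int) 26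
  String.ofList (key.toList.foldl
    (fun out c => Char.ofNat ((PySem.Int.mod ((c.toNat : Int) - 65 - s) 26 + 65).toNat) :: out)
    [])

-- ===== PRECONDITION & SPEC =====
def Spec_reverse_and_shift_key (key : String) (out : String) : Prop := out = reverse_and_shift_key_alt key
instance (key : String) (out : String) : Decidable (Spec_reverse_and_shift_key key out) := by unfold Spec_reverse_and_shift_key; infer_instance

-- ===== CLAIM (what is proved, stated in full; the proofs are below) =====
def Claim_equal_reverse_and_shift_key : Prop := ∀ (key : String), Dom_reverse_and_shift_key key → Spec_reverse_and_shift_key key (reverse_and_shift_key key)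

-- ===== LEMMAS AND PROOFS =====

-- a foldl that prepends f c is the reversed map
theorem pv_foldl_prepend (f : Char → Char) (l : List Char) (acc : List Char) :
    l.foldl (fun out c => f c :: out) acc = (l.map f).reverse ++ acc := by
  induction l generalizing acc with
  | nil => simp
  | cons c t ih => simp [ih]

-- reducing the shift mod 26 does not change the result
theorem pv_shift_reduce (n : Nat) (a : Int) :
    PySem.Int.mod (a - PySem.Int.mod (n : Int) 26) 26 = PySem.Int.mod (a - (n : Int)) 26 := by
  rw [PySem.Int.mod_eq_emod_of_pos (by norm_num : (0:Int) < 26),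
      PySem.Int.mod_eq_emod_of_pos (by norm_num : (0:Int) < 26),
      PySem.Int.mod_eq_emod_of_pos (by norm_num : (0:Int) < 26)]
  conv_rhs => rw [Int.sub_emod]
  rw [Int.sub_emod, Int.emod_emod_of_dvd _ (by norm_num)]

-- ===== VERDICT (by name: the statement is the Claim_ definition above) =====
theorem reverse_and_shift_key_spec : Claim_equal_reverse_and_shift_key := by
  intro key _
  unfold Spec_reverse_and_shift_key reverse_and_shift_key reverse_and_shift_key_alt
  simp only
  rw [pv_foldl_prepend, List.append_nil, ← List.map_reverse]
  congr 1
  apply List.map_congr_left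
  intro c _
  unfold pvShiftA
  rw [pv_shift_reduce key.toList.length ((c.toNat : Int) - 65)]
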